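-- pv_equiv track=rewrite | github.com/guru4elephant/agentic-rollout-library | workers/tools/cc_tools/ls_tool/k8s_ls_tool.py | _is_hidden_path
-- ===== SOURCE A (Python) =====
-- def _is_hidden_path(p: str) -> bool:
--     p2 = p[:-1] if p.endswith("/") else p
--     for seg in p2.split("/"):
--         if seg == "":
--             continue
--         if seg.startswith("."):
--             return True
--     return False
-- ===== SOURCE B (Python) =====
-- def _is_hidden_path(p: str) -> bool:
--     return p.startswith(".") or "/." in p
-- ===== Notes on version B (the rewrite author's own statement) =====
-- stated objective: simpler
-- what changed: Replaces the strip-trailing-slash / split-on-'/' / loop-over-segments scan with a direct string test: a hidden segment exists iff the path starts with '.' or contains the substring '/.', so B is one line with no tokenization.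
import Mathlib
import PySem

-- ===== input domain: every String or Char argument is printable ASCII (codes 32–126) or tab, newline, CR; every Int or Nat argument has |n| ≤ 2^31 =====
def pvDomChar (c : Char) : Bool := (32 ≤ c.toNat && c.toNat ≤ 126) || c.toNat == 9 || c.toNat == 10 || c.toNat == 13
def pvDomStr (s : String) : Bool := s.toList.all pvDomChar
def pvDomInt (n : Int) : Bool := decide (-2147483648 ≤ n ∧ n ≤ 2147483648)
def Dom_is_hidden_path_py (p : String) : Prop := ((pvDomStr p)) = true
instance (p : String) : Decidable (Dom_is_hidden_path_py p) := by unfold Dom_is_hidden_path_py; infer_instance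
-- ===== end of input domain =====

-- B replaces A's strip-trailing-slash + split-on-'/' + segment loop by the direct test
-- "p starts with '.' or contains the substring '/.'" (objective: simpler).


-- ===== PORT A =====
-- the 'for seg in …: if seg == "": continue; if seg.startswith("."): return True' loop
def hidLoop : List String → Bool
  | [] => false
  | seg :: rest =>
      if seg == "" then hidLoop rest
      else if PySem.Str.startswith seg "." then true
      else hidLoop rest

def is_hidden_path_py (p : String) : Bool :=
  let p2 := if PySem.Str.endswith p "/" then PySem.Str.slice p none (some (-1)) else p
  match PySem.Str.split? p2 "/" with
  | some segs => hidLoop segs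
  | none => false   -- unreachable: the separator "/" is nonempty

-- ===== PORT B =====
def is_hidden_path_py_alt (p : String) : Bool :=
  PySem.Str.startswith p "." || PySem.Str.isIn "/." p

-- ===== PRECONDITION & SPEC =====
def Spec_is_hidden_path_py (p : String) (out : Bool) : Prop := out = is_hidden_path_py_alt p
instance (p : String) (out : Bool) : Decidable (Spec_is_hidden_path_py p out) := by unfold Spec_is_hidden_path_py; infer_instance

-- ===== CLAIM (what is proved, stated in full; the proofs are below) =====
def Claim_equal_is_hidden_path_py : Prop := ∀ (p : String), Dom_is_hidden_path_py p → Spec_is_hidden_path_py p (is_hidden_path_py p)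

-- ===== LEMMAS AND PROOFS =====

-- spec version of Chars.splitOn with separator ['/']
def fsplit : List Char → List Char → List (List Char)
  | [], cur => [cur.reverse]
  | c :: rest, cur => if c = '/' then cur.reverse :: fsplit rest [] else fsplit rest (c :: cur)

-- hidLoop on char-list segments
def hidSegsC : List (List Char) → Bool
  | [] => false
  | s :: rest =>
      if s = [] then hidSegsC rest
      else if PySem.Chars.startswith s ['.'] then true
      else hidSegsC rest

def headDot : List Char → Bool
  | [] => false
  | c :: _ => c == '.'

-- '.' occurring immediately after a '/'
def hDAS : List Char → Bool
  | [] => false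
  | c :: rest => (c == '/' && headDot rest) || hDAS rest

-- scanner: Bool state = "at the start of a segment"
def scanRest : List Char → Bool → Bool
  | [], _ => false
  | c :: rest, atStart =>
      if c = '/' then scanRest rest true
      else (atStart && c == '.') || scanRest rest false

theorem go_eq_fsplit (l : List Char) : ∀ (fuel : Nat) (cur : List Char) (acc : List (List Char)),
    l.length < fuel →
    PySem.Chars.splitOn.go ['/'] fuel l cur acc = acc.reverse ++ fsplit l cur := by
  induction l with
  | nil =>
      intro fuel cur acc h
      match fuel with
      | n + 1 => simp [PySem.Chars.splitOn.go, fsplit]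
  | cons c rest ih =>
      intro fuel cur acc h
      match fuel with
      | n + 1 =>
        simp only [List.length_cons, Nat.add_lt_add_iff_right] at h
        rw [PySem.Chars.splitOn.go]
        by_cases hc : c = '/'
        · subst hc
          simp [List.isPrefixOf, ih n [] (cur.reverse :: acc) (by omega), fsplit]
        · have : (['/'].isPrefixOf (c :: rest)) = false := by
            simp [List.isPrefixOf]; exact fun h' => absurd h'.symm hc
          simp [this, ih n (c :: cur) acc (by omega), fsplit, hc]

theorem splitOn_eq_fsplit (l : List Char) :
    PySem.Chars.splitOn l ['/'] = fsplit l [] := by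
  unfold PySem.Chars.splitOn
  simpa using go_eq_fsplit l (l.length + 1) [] [] (by omega)

theorem hidSegsC_cons (s : List Char) (segs : List (List Char)) :
    hidSegsC (s :: segs) = (headDot s || hidSegsC segs) := by
  cases s with
  | nil => simp [hidSegsC, headDot]
  | cons c t =>
      have : PySem.Chars.startswith (c :: t) ['.'] = (c == '.') := by
        simp [PySem.Chars.startswith, List.isPrefixOf, eq_comm]
      simp only [hidSegsC, headDot, this]
      by_cases h : c = '.' <;> simp [h]

theorem headDot_append_singleton (xs : List Char) (c : Char) :
    headDot (xs ++ [c]) = (if xs = [] then (c == '.') else headDot xs) := by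
  cases xs <;> simp [headDot]

theorem hidSegsC_fsplit (l : List Char) : ∀ cur : List Char,
    hidSegsC (fsplit l cur) = (headDot cur.reverse || scanRest l cur.isEmpty) := by
  induction l with
  | nil => intro cur; simp [fsplit, hidSegsC_cons, hidSegsC, scanRest]
  | cons c rest ih =>
      intro cur
      by_cases hc : c = '/'
      · subst hc
        simp [fsplit, hidSegsC_cons, ih [], scanRest, headDot]
      · simp only [fsplit, scanRest, if_neg hc]
        rw [ih (c :: cur)]
        simp only [List.reverse_cons, headDot_append_singleton]
        cases cur <;> simp [headDot]

theorem scanRest_append_slash (l : List Char) : ∀ b : Bool,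
    scanRest (l ++ ['/']) b = scanRest l b := by
  induction l with
  | nil => intro b; simp [scanRest]
  | cons c rest ih =>
      intro b
      by_cases hc : c = '/' <;> simp [scanRest, hc, ih]

theorem scanRest_eq (l : List Char) :
    (scanRest l false = hDAS l) ∧ (scanRest l true = (headDot l || hDAS l)) := by
  induction l with
  | nil => simp [scanRest, hDAS, headDot]
  | cons c rest ih =>
      by_cases hc : c = '/'
      · subst hc
        simp only [scanRest, hDAS, headDot, ih.2, beq_self_eq_true, Bool.true_and]
        constructor
        · rfl
        · have : (('/' : Char) == '.') = false := by decide
          simp [this]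
      · have hb : (c == '/') = false := by simp [hc]
        simp only [scanRest, if_neg hc, hDAS, headDot, hb, ih.1, Bool.false_and, Bool.false_or]
        constructor <;> simp

theorem headDot_iff (l : List Char) : ['.'] <+: l ↔ headDot l = true := by
  cases l with
  | nil => simp [headDot]
  | cons c t =>
      simp only [headDot, List.cons_prefix_cons, List.nil_prefix, and_true, beq_iff_eq]
      exact eq_comm

theorem hDAS_iff (l : List Char) : ['/', '.'] <:+: l ↔ hDAS l = true := by
  induction l with
  | nil =>
      simp only [hDAS, Bool.false_eq_true, iff_false]
      intro h
      have := h.length_le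
      simp at this
  | cons c rest ih =>
      rw [List.infix_cons_iff]
      simp only [hDAS, List.cons_prefix_cons, Bool.or_eq_true, Bool.and_eq_true, beq_iff_eq, ih]
      rw [headDot_iff]
      tauto

theorem hidLoop_map (segs : List (List Char)) :
    hidLoop (segs.map String.ofList) = hidSegsC segs := by
  induction segs with
  | nil => simp [hidLoop, hidSegsC]
  | cons s rest ih =>
      simp only [List.map_cons, hidLoop, hidSegsC]
      have h1 : (String.ofList s == "") = decide (s = []) := by
        rw [Bool.eq_iff_iff, beq_iff_eq, decide_eq_true_eq]
        constructor
        · intro h; simpa using congrArg String.toList h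
        · rintro rfl; rfl
      have h2 : PySem.Str.startswith (String.ofList s) "." = PySem.Chars.startswith s ['.'] := by
        rw [PySem.Str.startswith_eq, String.toList_ofList]
        have hd : ("." : String).toList = ['.'] := by decide
        rw [hd]
      by_cases hs : s = [] <;> simp [h1, hs, ih, h2]

theorem alt_eq_scan (p : String) :
    is_hidden_path_py_alt p = scanRest p.toList true := by
  rw [(scanRest_eq p.toList).2]
  unfold is_hidden_path_py_alt
  have hd : ("." : String).toList = ['.'] := by decide
  have hds : ("/." : String).toList = ['/', '.'] := by decide
  have h1 : PySem.Str.startswith p "." = headDot p.toList := by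
    rw [Bool.eq_iff_iff, PySem.Str.startswith_eq, hd, PySem.Chars.startswith_iff]
    exact headDot_iff p.toList
  have h2 : PySem.Str.isIn "/." p = hDAS p.toList := by
    rw [Bool.eq_iff_iff, PySem.Str.isIn_iff_infix, hds]
    exact hDAS_iff p.toList
  rw [h1, h2]

-- ===== VERDICT (by name: the statement is the Claim_ definition above) =====
theorem is_hidden_path_py_spec : Claim_equal_is_hidden_path_py := by
  intro p _
  unfold Spec_is_hidden_path_py
  rw [alt_eq_scan]
  unfold is_hidden_path_py
  have hsep : PySem.Str.split? (if PySem.Str.endswith p "/" then PySem.Str.slice p none (some (-1)) else p) "/" =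
      some (((PySem.Chars.splitOn (if PySem.Str.endswith p "/" then PySem.Str.slice p none (some (-1)) else p).toList ['/']).map String.ofList)) := by
    rw [PySem.Str.split?]
    simp [PySem.Chars.split?]
  simp only [hsep]
  rw [hidLoop_map, splitOn_eq_fsplit, hidSegsC_fsplit]
  simp only [List.reverse_nil, headDot, List.isEmpty_nil, Bool.false_or]
  have hsl : ("/" : String).toList = ['/'] := by decide
  by_cases he : PySem.Str.endswith p "/"
  · rw [if_pos he]
    have hsuf : ['/'] <:+ p.toList := by
      rw [← PySem.Chars.endswith_iff]
      rw [PySem.Str.endswith_eq, hsl] at he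
      exact he
    obtain ⟨l0, hl0⟩ := hsuf
    have hslice : (PySem.Str.slice p none (some (-1))).toList = p.toList.dropLast :=
      PySem.Str.slice_to_neg_one p
    rw [hslice, ← hl0, List.dropLast_concat]
    rw [← scanRest_append_slash l0 true]
  · rw [if_neg he]
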